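-- pv_equiv track=rewrite | github.com/leeping/forcebalance | tools/PoltypeInterface/forcebalancepoltypeinterface.py | GrabMoleculeOrder
-- ===== SOURCE A (Python) =====
-- def GrabMoleculeOrder(poltypepathlist,nametopropsarray):
--     nametoarrayindexorder={}
--     for name in nametopropsarray.keys():
--         foundname=False
--         for poltypepathidx in range(len(poltypepathlist)):
--             poltypepath=poltypepathlist[poltypepathidx]
--             if name in poltypepath:
--                 foundname=True
--                 break
--         if foundname==False:
--             continue
--         nametoarrayindexorder[name]=poltypepathidx
--     return nametoarrayindexorder
-- ===== SOURCE B (Python) =====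
-- def GrabMoleculeOrder(poltypepathlist, nametopropsarray):
--     # Path-major sweep: assign each still-unassigned name the index of the
--     # first path containing it, then emit results in the original key order.
--     assigned = {}
--     remaining = list(nametopropsarray.keys())
--     for idx, path in enumerate(poltypepathlist):
--         if not remaining:
--             break
--         for name in remaining:
--             if name in path:
--                 assigned[name] = idx
--         remaining = [name for name in remaining if name not in path]
--     return {name: assigned[name] for name in nametopropsarray.keys() if name in assigned}
-- ===== Notes on version B (the rewrite author's own statement) =====
-- stated objective: alternative
-- what changed: Inverted the loop nesting: a path-major sweep assigns each still-unassigned name to the first path index containing it (shrinking the unassigned set and breaking early once empty), then the result is emitted in key order; A instead scans all paths per name.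
import Mathlib
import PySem

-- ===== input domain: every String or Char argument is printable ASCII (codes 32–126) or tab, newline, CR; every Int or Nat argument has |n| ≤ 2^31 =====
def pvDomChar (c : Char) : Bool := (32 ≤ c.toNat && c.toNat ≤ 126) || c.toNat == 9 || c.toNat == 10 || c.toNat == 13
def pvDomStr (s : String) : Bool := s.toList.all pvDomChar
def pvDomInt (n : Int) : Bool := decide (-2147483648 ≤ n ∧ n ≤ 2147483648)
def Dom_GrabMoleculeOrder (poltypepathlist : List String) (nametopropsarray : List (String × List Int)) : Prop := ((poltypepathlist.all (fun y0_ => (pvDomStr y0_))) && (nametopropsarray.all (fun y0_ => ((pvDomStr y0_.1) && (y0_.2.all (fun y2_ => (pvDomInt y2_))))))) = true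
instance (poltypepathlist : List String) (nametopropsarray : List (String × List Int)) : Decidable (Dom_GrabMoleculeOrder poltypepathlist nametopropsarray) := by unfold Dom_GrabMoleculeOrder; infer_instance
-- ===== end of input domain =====

-- B replaces A's name-major scan by a path-major sweep over still-unassigned names
-- (with early exit once every name is assigned), emitting the result in key order.

-- ===== PORT A =====
-- A's inner 'for poltypepathidx in range(len(poltypepathlist)): … break' : first index whose path contains name
def pvFindA (name : String) (paths : List String) (i : Int) : Option Int :=
  match paths with
  | [] => none
  | p :: rest => if PySem.Str.isIn name p then some i else pvFindA name rest (i + 1)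

-- dict keys: distinct names in first-occurrence order; d[name]=idx appends since each key is fresh
def GrabMoleculeOrder (poltypepathlist : List String) (nametopropsarray : List (String × List Int)) : List (String × Int) :=
  (PySem.List.dedup (nametopropsarray.map Prod.fst)).foldl
    (fun d name =>
      match pvFindA name poltypepathlist 0 with
      | none => d
      | some i => d ++ [(name, i)]) []

-- ===== PORT B =====
-- the path-major sweep: per path, record idx for contained names, drop them from `remaining`
def pvSweepB (paths : List String) (idx : Int) (assigned : List (String × Int)) (remaining : List String) : List (String × Int) :=
  match paths with
  | [] => assigned
  | p :: rest =>
    if remaining.isEmpty then assigned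
    else
      let assigned' := remaining.foldl
        (fun d name => if PySem.Str.isIn name p then d ++ [(name, idx)] else d) assigned
      let remaining' := remaining.filter (fun name => !PySem.Str.isIn name p)
      pvSweepB rest (idx + 1) assigned' remaining'

def GrabMoleculeOrder_alt (poltypepathlist : List String) (nametopropsarray : List (String × List Int)) : List (String × Int) :=
  let keys := PySem.List.dedup (nametopropsarray.map Prod.fst)
  let assigned := pvSweepB poltypepathlist 0 [] keys
  keys.foldl
    (fun out name =>
      match List.lookup name assigned with
      | some v => out ++ [(name, v)]
      | none => out) []

-- ===== PRECONDITION & SPEC =====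
def Spec_GrabMoleculeOrder (poltypepathlist : List String) (nametopropsarray : List (String × List Int)) (out : List (String × Int)) : Prop := out = GrabMoleculeOrder_alt poltypepathlist nametopropsarray
instance (poltypepathlist : List String) (nametopropsarray : List (String × List Int)) (out : List (String × Int)) : Decidable (Spec_GrabMoleculeOrder poltypepathlist nametopropsarray out) := by unfold Spec_GrabMoleculeOrder; infer_instance

-- ===== CLAIM (what is proved, stated in full; the proofs are below) =====
def Claim_equal_GrabMoleculeOrder : Prop := ∀ (poltypepathlist : List String) (nametopropsarray : List (String × List Int)), Dom_GrabMoleculeOrder poltypepathlist nametopropsarray → Spec_GrabMoleculeOrder poltypepathlist nametopropsarray (GrabMoleculeOrder poltypepathlist nametopropsarray)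

-- ===== LEMMAS AND PROOFS =====

-- lookups in the (name, idx) block appended by one sweep step
lemma lookup_map_pair_eq_none (n : String) (l : List String) (idx : Int) (h : n ∉ l) :
    List.lookup n (l.map (fun m => (m, idx))) = none := by
  induction l with
  | nil => rfl
  | cons m t ih =>
    have hne : (n == m) = false := by
      simp only [beq_eq_false_iff_ne, ne_eq]
      rintro rfl
      exact h List.mem_cons_self
    simp only [List.map_cons, List.lookup_cons, hne]
    exact ih (fun hm => h (List.mem_cons_of_mem _ hm))

lemma lookup_map_pair_eq_some (n : String) (l : List String) (idx : Int) (h : n ∈ l) :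
    List.lookup n (l.map (fun m => (m, idx))) = some idx := by
  induction l with
  | nil => simp at h
  | cons m t ih =>
    by_cases hnm : n = m
    · subst hnm; simp
    · have hne : (n == m) = false := by simp [hnm]
      simp only [List.map_cons, List.lookup_cons, hne]
      exact ih ((List.mem_cons.mp h).resolve_left hnm)

-- the inner per-path fold appends exactly the contained names
lemma sweep_inner (p : String) (idx : Int) (assigned : List (String × Int)) (remaining : List String) :
    remaining.foldl (fun d name => if PySem.Str.isIn name p then d ++ [(name, idx)] else d) assigned
      = assigned ++ (remaining.filter (fun name => PySem.Str.isIn name p)).map (fun name => (name, idx)) := by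
  induction remaining generalizing assigned with
  | nil => simp
  | cons n t ih =>
    rw [List.foldl_cons, ih]
    by_cases h : PySem.Chars.isIn n.toList p.toList = true
    · simp [h]
    · simp [h]

-- lookup in the sweep result: for names still unassigned it is A's first-match index
lemma sweep_lookup (paths : List String) (idx : Int) (assigned : List (String × Int))
    (remaining : List String) (n : String)
    (h1 : n ∈ remaining → List.lookup n assigned = none) :
    List.lookup n (pvSweepB paths idx assigned remaining)
      = if n ∈ remaining then pvFindA n paths idx else List.lookup n assigned := by
  induction paths generalizing idx assigned remaining with
  | nil =>
    simp only [pvSweepB, pvFindA]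
    split_ifs with h
    · exact h1 h
    · rfl
  | cons p rest ih =>
    simp only [pvSweepB]
    by_cases hre : remaining.isEmpty
    · have hre' : remaining = [] := List.isEmpty_iff.mp hre
      subst hre'; simp
    · rw [if_neg hre, sweep_inner]
      have hnewpre : n ∈ List.filter (fun name => !PySem.Str.isIn name p) remaining →
          List.lookup n (assigned ++ (remaining.filter (fun name => PySem.Str.isIn name p)).map (fun name => (name, idx))) = none := by
        intro hn
        have hmem : n ∈ remaining := (List.mem_filter.mp hn).1
        have hin : ¬ n ∈ remaining.filter (fun name => PySem.Str.isIn name p) := by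
          have := (List.mem_filter.mp hn).2
          simp only [List.mem_filter]
          rintro ⟨-, hc⟩
          simp only [PySem.Str.isIn_eq] at hc
          simp [hc] at this
        rw [List.lookup_append, h1 hmem, Option.none_or]
        exact lookup_map_pair_eq_none n _ idx hin
      rw [ih _ _ _ hnewpre]
      by_cases hmem : n ∈ remaining
      · by_cases hin : PySem.Chars.isIn n.toList p.toList = true
        · have hnot : n ∉ List.filter (fun name => !PySem.Str.isIn name p) remaining := by
            simp [List.mem_filter, hin]
          have hf : n ∈ remaining.filter (fun name => PySem.Str.isIn name p) := by
            simp [List.mem_filter, hmem, hin]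
          rw [if_neg hnot, if_pos hmem, List.lookup_append, h1 hmem, Option.none_or,
            lookup_map_pair_eq_some n _ idx hf]
          simp [pvFindA, hin]
        · have hyes : n ∈ List.filter (fun name => !PySem.Str.isIn name p) remaining := by
            simp [List.mem_filter, hmem, hin]
          rw [if_pos hyes, if_pos hmem]
          simp [pvFindA, hin]
      · have hnot : n ∉ List.filter (fun name => !PySem.Str.isIn name p) remaining :=
          fun h => hmem (List.mem_filter.mp h).1
        have h2 : List.lookup n ((remaining.filter (fun name => PySem.Str.isIn name p)).map (fun name => (name, idx))) = none :=
          lookup_map_pair_eq_none n _ idx (fun h => hmem (List.mem_filter.mp h).1)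
        rw [if_neg hnot, if_neg hmem, List.lookup_append, h2, Option.or_none]

-- both final folds agree element-wise on the key list (A's and B's match-arm orders)
lemma final_fold (keys : List String) (f g : String → Option Int)
    (h : ∀ n ∈ keys, f n = g n) (acc : List (String × Int)) :
    keys.foldl (fun d name => match f name with | none => d | some i => d ++ [(name, i)]) acc
      = keys.foldl (fun out name => match g name with | some v => out ++ [(name, v)] | none => out) acc := by
  induction keys generalizing acc with
  | nil => rfl
  | cons k t ih =>
    rw [List.foldl_cons, List.foldl_cons, h k List.mem_cons_self]
    cases g k <;> exact ih (fun n hn => h n (List.mem_cons_of_mem _ hn)) _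

-- ===== VERDICT (by name: the statement is the Claim_ definition above) =====
theorem GrabMoleculeOrder_spec : Claim_equal_GrabMoleculeOrder := by
  intro paths arr _
  unfold Spec_GrabMoleculeOrder GrabMoleculeOrder GrabMoleculeOrder_alt
  refine final_fold (PySem.List.dedup (arr.map Prod.fst))
    (fun n => pvFindA n paths 0)
    (fun n => List.lookup n (pvSweepB paths 0 [] (PySem.List.dedup (arr.map Prod.fst)))) ?_ []
  intro n hn
  have h := sweep_lookup paths 0 [] (PySem.List.dedup (arr.map Prod.fst)) n (fun _ => rfl)
  rw [if_pos hn] at h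
  exact h.symm
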